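-- pv_equiv track=rewrite | github.com/seamoonpandey/Xbow | modules/payload-gen-module/obfuscator.py | _double_url_encode
-- ===== SOURCE A (Python) =====
-- def _double_url_encode(payload: str) -> str | None:
--     """double percent-encode special characters"""
--     targets = {
--         "<": "%253C", ">": "%253E", "'": "%2527",
--         '"': "%2522", " ": "%2520", "/": "%252F",
--     }
--     result = payload
--     encoded_any = False
--     for ch, enc in targets.items():
--         if ch in result:
--             result = result.replace(ch, enc, 1)
--             encoded_any = True
--     return result if encoded_any else None
-- ===== SOURCE B (Python) =====
-- def _double_url_encode(payload: str) -> str | None: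
--     """double percent-encode special characters"""
--     targets = {
--         "<": "%253C", ">": "%253E", "'": "%2527",
--         '"': "%2522", " ": "%2520", "/": "%252F",
--     }
--     remaining = set(targets)
--     out = []
--     for ch in payload:
--         if ch in remaining:
--             out.append(targets[ch])
--             remaining.discard(ch)
--         else:
--             out.append(ch)
--     return "".join(out) if len(remaining) < len(targets) else None
-- ===== Notes on version B (the rewrite author's own statement) =====
-- stated objective: alternative
-- what changed: Replaces six sequential whole-string replace passes by one left-to-right scan that maintains a set of target characters not yet encoded and encodes the first occurrence of each as it is met.
import Mathlib
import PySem

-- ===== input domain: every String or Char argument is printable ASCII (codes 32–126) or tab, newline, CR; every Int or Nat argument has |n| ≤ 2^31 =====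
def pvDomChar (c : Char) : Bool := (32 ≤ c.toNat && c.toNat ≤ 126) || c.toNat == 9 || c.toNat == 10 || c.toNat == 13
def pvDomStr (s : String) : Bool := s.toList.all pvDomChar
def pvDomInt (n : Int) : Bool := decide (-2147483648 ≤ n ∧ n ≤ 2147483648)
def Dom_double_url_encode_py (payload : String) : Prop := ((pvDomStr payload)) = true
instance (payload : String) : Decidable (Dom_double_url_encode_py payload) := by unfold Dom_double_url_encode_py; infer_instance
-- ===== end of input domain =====

-- B replaces A's six sequential one-occurrence replace passes by a single left-to-right
-- scan with a set of not-yet-encoded target characters (objective: alternative decomposition).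

-- ===== PORT A =====
-- the dict literal `targets`, as its items() in insertion order
def pvTargets : List (Char × List Char) :=
  [('<', ['%','2','5','3','C']), ('>', ['%','2','5','3','E']),
   ('\'', ['%','2','5','2','7']), ('"', ['%','2','5','2','2']),
   (' ', ['%','2','5','2','0']), ('/', ['%','2','5','2','F'])]

-- exact port of str.replace(old, new, 1) for a single-character `old`, on the char list
def pvReplaceFirst (c : Char) (e : List Char) : List Char → List Char
  | [] => []
  | x :: xs => if x = c then e ++ xs else x :: pvReplaceFirst c e xs

-- the loop body; `ch in result` is single-char membership, exact on the char list
def pvAStep (st : List Char × Bool) (p : Char × List Char) : List Char × Bool :=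
  if p.1 ∈ st.1 then (pvReplaceFirst p.1 p.2 st.1, true) else st

def double_url_encode_py (payload : String) : Option String :=
  let st := pvTargets.foldl pvAStep (payload.toList, false)
  if st.2 then some (String.mk st.1) else none

-- ===== PORT B =====
-- targets[ch] lookup of Source B
def pvEncOf (c : Char) : List Char :=
  if c = '<' then ['%','2','5','3','C']
  else if c = '>' then ['%','2','5','3','E']
  else if c = '\'' then ['%','2','5','2','7']
  else if c = '"' then ['%','2','5','2','2']
  else if c = ' ' then ['%','2','5','2','0']
  else if c = '/' then ['%','2','5','2','F']
  else [c]

-- the scan loop of Source B: returns (out, remaining)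
def pvAltGo (remaining : PySem.Set Char) : List Char → List Char × PySem.Set Char
  | [] => ([], remaining)
  | x :: xs =>
      if PySem.Set.contains remaining x then
        let r := pvAltGo (PySem.Set.discard remaining x) xs
        (pvEncOf x ++ r.1, r.2)
      else
        let r := pvAltGo remaining xs
        (x :: r.1, r.2)

def double_url_encode_py_alt (payload : String) : Option String :=
  let r := pvAltGo (PySem.Set.ofList ['<','>','\'','"',' ','/']) payload.toList
  -- len(remaining) < len(targets); len(targets) = 6
  if r.2.length < 6 then some (String.mk r.1) else none

-- ===== PRECONDITION & SPEC =====
def Spec_double_url_encode_py (payload : String) (out : Option String) : Prop := out = double_url_encode_py_alt payload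
instance (payload : String) (out : Option String) : Decidable (Spec_double_url_encode_py payload out) := by unfold Spec_double_url_encode_py; infer_instance

-- ===== CLAIM (what is proved, stated in full; the proofs are below) =====
def Claim_equal_double_url_encode_py : Prop := ∀ (payload : String), Dom_double_url_encode_py payload → Spec_double_url_encode_py payload (double_url_encode_py payload)

-- ===== LEMMAS AND PROOFS =====

-- reference function: encode, in text order, the first occurrence of each char of S
def pvR (S : List Char) : List Char → List Char
  | [] => []
  | x :: xs => if x ∈ S then pvEncOf x ++ pvR (S.filter (· ≠ x)) xs else x :: pvR S xs

theorem pvR_nil (l : List Char) : pvR [] l = l := by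
  induction l with
  | nil => rfl
  | cons x xs ih => simp [pvR, ih]

theorem pvR_congr (S₁ S₂ : List Char) (l : List Char)
    (h : ∀ a, a ∈ S₁ ↔ a ∈ S₂) : pvR S₁ l = pvR S₂ l := by
  induction l generalizing S₁ S₂ with
  | nil => rfl
  | cons x xs ih =>
      by_cases hx : x ∈ S₁
      · have hx₂ : x ∈ S₂ := (h x).mp hx
        simp only [pvR, if_pos hx, if_pos hx₂]
        rw [ih]
        intro a; simp only [List.mem_filter, decide_eq_true_eq]
        exact and_congr_left fun _ => h a
      · have hx₂ : x ∉ S₂ := fun hh => hx ((h x).mpr hh)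
        simp only [pvR, if_neg hx, if_neg hx₂]
        rw [ih _ _ h]

theorem pvReplaceFirst_of_not_mem (c : Char) (e : List Char) (l : List Char)
    (h : c ∉ l) : pvReplaceFirst c e l = l := by
  induction l with
  | nil => rfl
  | cons x xs ih =>
      simp only [List.mem_cons, not_or] at h
      simp only [pvReplaceFirst]
      rw [if_neg (fun hh => h.1 (Eq.symm hh)), ih h.2]

theorem pvReplaceFirst_append (c : Char) (e a b : List Char)
    (h : c ∉ a) : pvReplaceFirst c e (a ++ b) = a ++ pvReplaceFirst c e b := by
  induction a with
  | nil => rfl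
  | cons x xs ih =>
      simp only [List.mem_cons, not_or] at h
      simp only [List.cons_append, pvReplaceFirst]
      rw [if_neg (fun hh => h.1 (Eq.symm hh)), ih h.2]

theorem mem_pvR (c : Char) (S : List Char) (l : List Char)
    (hS : c ∉ S) (henc : ∀ a ∈ S, c ∉ pvEncOf a) : c ∈ pvR S l ↔ c ∈ l := by
  induction l generalizing S with
  | nil => simp [pvR]
  | cons x xs ih =>
      by_cases hx : x ∈ S
      · have hne : c ≠ x := fun hh => hS (hh ▸ hx)
        simp only [pvR, if_pos hx, List.mem_append, List.mem_cons]
        have h1 : c ∉ pvEncOf x := henc x hx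
        have h2 : c ∉ S.filter (· ≠ x) := fun hh => hS (List.mem_of_mem_filter hh)
        have h3 : ∀ a ∈ S.filter (· ≠ x), c ∉ pvEncOf a :=
          fun a ha => henc a (List.mem_of_mem_filter ha)
        rw [ih _ h2 h3]
        simp [h1, hne]
      · simp only [pvR, if_neg hx, List.mem_cons]
        rw [ih _ hS henc]

theorem pvR_key (c : Char) (S : List Char) (l : List Char)
    (hS : c ∉ S) (henc : ∀ a ∈ S, c ∉ pvEncOf a) :
    pvReplaceFirst c (pvEncOf c) (pvR S l) = pvR (c :: S) l := by
  induction l generalizing S with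
  | nil => rfl
  | cons x xs ih =>
      by_cases hxc : x = c
      · subst hxc
        simp only [pvR, if_neg hS, if_pos (List.mem_cons_self)]
        simp only [pvReplaceFirst, if_true]
        congr 1
        exact pvR_congr _ _ _ (by
          intro a
          simp only [List.mem_filter, List.mem_cons, decide_eq_true_eq]
          constructor
          · intro h; exact ⟨Or.inr h, fun hh => hS (hh ▸ h)⟩
          · rintro ⟨h1 | h1, h2⟩
            · exact absurd h1 h2
            · exact h1)
      · by_cases hx : x ∈ S
        · have hcx : c ≠ x := fun hh => hxc hh.symm
          simp only [pvR, if_pos hx, if_pos (List.mem_cons_of_mem _ hx)]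
          rw [pvReplaceFirst_append _ _ _ _ (henc x hx)]
          congr 1
          have hfe : (c :: S).filter (· ≠ x) = c :: S.filter (· ≠ x) := by
            simp [List.filter, hcx]
          rw [hfe]
          exact ih _ (fun hh => hS (List.mem_of_mem_filter hh))
            (fun a ha => henc a (List.mem_of_mem_filter ha))
        · have hxcS : x ∉ c :: S := by
            simp only [List.mem_cons, not_or]; exact ⟨hxc, hx⟩
          simp only [pvR, if_neg hx, if_neg hxcS]
          simp only [pvReplaceFirst, if_neg hxc]
          rw [ih _ hS henc]

-- one pass of A's loop, on a state already of the shape (pvR S l, f)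
theorem pvAStep_eq (c : Char) (S : List Char) (l : List Char) (f : Bool)
    (hS : c ∉ S) (henc : ∀ a ∈ S, c ∉ pvEncOf a) :
    pvAStep (pvR S l, f) (c, pvEncOf c) = (pvR (c :: S) l, f || decide (c ∈ l)) := by
  by_cases h : c ∈ l
  · have hmem : c ∈ pvR S l := (mem_pvR c S l hS henc).mpr h
    simp only [pvAStep, if_pos hmem]
    rw [pvR_key c S l hS henc]
    simp [h]
  · have hmem : c ∉ pvR S l := fun hh => h ((mem_pvR c S l hS henc).mp hh)
    simp only [pvAStep, if_neg hmem]
    have : pvR (c :: S) l = pvR S l := by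
      rw [← pvR_key c S l hS henc, pvReplaceFirst_of_not_mem _ _ _ hmem]
    simp [this, h]

theorem pvAltGo_fst (S : PySem.Set Char) (l : List Char) :
    (pvAltGo S l).1 = pvR S l := by
  induction l generalizing S with
  | nil => rfl
  | cons x xs ih =>
      by_cases hx : x ∈ S
      · have hc : PySem.Set.contains S x = true := by
          simp [PySem.Set.contains, hx]
        have hd : PySem.Set.discard S x = S.filter (· ≠ x) := by
          simp only [PySem.Set.discard]
          apply List.filter_congr
          intro a _; by_cases hax : a = x <;> simp [hax]
        simp only [pvAltGo, hc, if_pos, pvR, if_pos hx, hd, ih]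
      · have hc : PySem.Set.contains S x = false := by
          simp [PySem.Set.contains, hx]
        simp only [pvAltGo, hc, Bool.false_eq_true, if_false, pvR, if_neg hx, ih]

theorem pvAltGo_snd (S : PySem.Set Char) (l : List Char) :
    (pvAltGo S l).2 = S.filter (fun a => !l.contains a) := by
  induction l generalizing S with
  | nil => simp [pvAltGo]
  | cons x xs ih =>
      by_cases hx : x ∈ S
      · have hc : PySem.Set.contains S x = true := by
          simp [PySem.Set.contains, hx]
        simp only [pvAltGo, hc, if_pos, ih]
        simp only [PySem.Set.discard, List.filter_filter]
        apply List.filter_congr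
        intro a _
        by_cases hax : a = x <;> by_cases haxs : a ∈ xs <;>
          simp [hax, haxs, List.contains_eq_mem]
      · have hc : PySem.Set.contains S x = false := by
          simp [PySem.Set.contains, hx]
        simp only [pvAltGo, hc, Bool.false_eq_true, if_false, ih]
        apply List.filter_congr
        intro a ha
        have hax : ¬ a = x := fun hh => hx (hh ▸ ha)
        by_cases haxs : a ∈ xs <;>
          simp [hax, haxs, List.contains_eq_mem]

-- ===== VERDICT (by name: the statement is the Claim_ definition above) =====
set_option maxRecDepth 10000 in
set_option maxHeartbeats 1000000 in
theorem double_url_encode_py_spec : Claim_equal_double_url_encode_py := by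
  intro payload _
  unfold Spec_double_url_encode_py double_url_encode_py double_url_encode_py_alt
  set l := payload.toList with hl
  -- A's fold, unrolled over the six dict items
  have h0 : (l, false) = (pvR [] l, false) := by rw [pvR_nil]
  have hfold : pvTargets.foldl pvAStep (l, false) =
      (pvR ['/', ' ', '"', '\'', '>', '<'] l,
        ((((false || decide ('<' ∈ l)) || decide ('>' ∈ l)) || decide ('\'' ∈ l)
          || decide ('"' ∈ l)) || decide (' ' ∈ l)) || decide ('/' ∈ l)) := by
    simp only [pvTargets, List.foldl_cons, List.foldl_nil]
    rw [h0]
    rw [show (('<' : Char), ['%','2','5','3','C']) = ('<', pvEncOf '<') from rfl,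
        pvAStep_eq '<' [] l false (by decide) (by intro a ha; cases ha)]
    rw [show (('>' : Char), ['%','2','5','3','E']) = ('>', pvEncOf '>') from rfl,
        pvAStep_eq '>' ['<'] l _ (by decide) (by intro a ha; fin_cases ha; simp [pvEncOf])]
    rw [show (('\'' : Char), ['%','2','5','2','7']) = ('\'', pvEncOf '\'') from rfl,
        pvAStep_eq '\'' ['>','<'] l _ (by decide) (by intro a ha; fin_cases ha <;> simp [pvEncOf])]
    rw [show (('"' : Char), ['%','2','5','2','2']) = ('"', pvEncOf '"') from rfl,
        pvAStep_eq '"' ['\'','>','<'] l _ (by decide) (by intro a ha; fin_cases ha <;> simp [pvEncOf])]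
    rw [show ((' ' : Char), ['%','2','5','2','0']) = (' ', pvEncOf ' ') from rfl,
        pvAStep_eq ' ' ['"','\'','>','<'] l _ (by decide) (by intro a ha; fin_cases ha <;> simp [pvEncOf])]
    rw [show (('/' : Char), ['%','2','5','2','F']) = ('/', pvEncOf '/') from rfl,
        pvAStep_eq '/' [' ','"','\'','>','<'] l _ (by decide) (by intro a ha; fin_cases ha <;> simp [pvEncOf])]
  have hkeys : PySem.Set.ofList ['<','>','\'','"',' ','/'] = ['<','>','\'','"',' ','/'] := by
    decide
  rw [hfold, hkeys]
  -- B's condition: remaining shrank iff some target occurs in l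
  have hsnd : (pvAltGo ['<','>','\'','"',' ','/'] l).2 =
      (['<','>','\'','"',' ','/'] : List Char).filter (fun a => !l.contains a) :=
    pvAltGo_snd _ l
  have hcond : ((pvAltGo ['<','>','\'','"',' ','/'] l).2.length < 6) ↔
      (((((false || decide ('<' ∈ l)) || decide ('>' ∈ l)) || decide ('\'' ∈ l)
          || decide ('"' ∈ l)) || decide (' ' ∈ l)) || decide ('/' ∈ l)) = true := by
    rw [hsnd]
    simp only [List.filter, Bool.or_eq_true, decide_eq_true_eq]
    by_cases h1 : '<' ∈ l <;> by_cases h2 : '>' ∈ l <;> by_cases h3 : '\'' ∈ l <;>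
      by_cases h4 : '"' ∈ l <;> by_cases h5 : ' ' ∈ l <;> by_cases h6 : '/' ∈ l <;>
      simp [h1, h2, h3, h4, h5, h6, List.contains_eq_mem]
  have hR : pvR ['/', ' ', '"', '\'', '>', '<'] l = pvR ['<','>','\'','"',' ','/'] l := by
    apply pvR_congr
    intro a
    simp only [List.mem_cons]
    constructor <;> (rintro (h|h|h|h|h|h|h) <;> simp [h])
  by_cases hflag : (((((false || decide ('<' ∈ l)) || decide ('>' ∈ l)) || decide ('\'' ∈ l)
          || decide ('"' ∈ l)) || decide (' ' ∈ l)) || decide ('/' ∈ l)) = true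
  · simp only [hflag, if_pos, if_pos (hcond.mpr hflag)]
    rw [hR, pvAltGo_fst]
  · have hc : ¬ ((pvAltGo ['<','>','\'','"',' ','/'] l).2.length < 6) :=
      fun hh => hflag (hcond.mp hh)
    have hflag' := hflag
    simp only [Bool.not_eq_true] at hflag'
    simp only [Bool.or_eq_false_iff, decide_eq_false_iff_not] at hflag'
    obtain ⟨⟨⟨⟨⟨⟨-, h1⟩, h2⟩, h3⟩, h4⟩, h5⟩, h6⟩ := hflag'
    simp only [Bool.not_eq_true] at hflag
    simp [hc]
    exact ⟨⟨⟨⟨⟨h1, h2⟩, h3⟩, h4⟩, h5⟩, h6⟩
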